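-- pv_equiv track=rewrite | github.com/Pippala1898/learningforplanning | data_loader.py | hash_sg
-- ===== SOURCE A (Python) =====
-- def hash_sg(relationships,
--             ob_names=('brown', 'purple', 'cyan', 'blue', 'red', 'green', 'gray','turquoise',
--                       "00", "01", "02", "10", "11", "12")):
--     """
--     hash into unique ID
--     :param relationships: [['brown', 'left', 'purple'] , ['yellow', 'up', 'yellow']]
--     :param ob_names:
--     :return:
--     """
--     for rel in relationships:
--         assert rel[0] in ob_names and rel[2] in ob_names
--
--     a_key = [0] * len(ob_names) * len(ob_names)
--     pred2id = {"none": 0, "left": 1, "up": 2, "front": 3}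
--     predefined_objects1 = ob_names[:]
--     predefined_objects2 = ob_names[:]
--     pair2pred = {}
--     for rel in relationships:
--         if rel[1] != "__in_image__":
--             pair2pred[(rel[0], rel[2])] = pred2id[rel[1]]
--
--     idx = 0
--     for ob1 in predefined_objects1:
--         for ob2 in predefined_objects2:
--             if (ob1, ob2) in pair2pred:
--                 a_key[idx] = pair2pred[(ob1, ob2)]
--             idx += 1
--     return tuple(a_key)
-- ===== SOURCE B (Python) =====
-- def hash_sg(relationships,
--             ob_names=('brown', 'purple', 'cyan', 'blue', 'red', 'green', 'gray','turquoise',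
--                       "00", "01", "02", "10", "11", "12")):
--     for rel in relationships:
--         assert rel[0] in ob_names and rel[2] in ob_names
--
--     n = len(ob_names)
--     pred2id = {"none": 0, "left": 1, "up": 2, "front": 3}
--     # object name -> all its positions (duplicates map to every index)
--     indices = {}
--     for i, name in enumerate(ob_names):
--         indices.setdefault(name, []).append(i)
--
--     a_key = [0] * (n * n)
--     for rel in relationships:
--         if rel[1] != "__in_image__":
--             v = pred2id[rel[1]]
--             for i in indices[rel[0]]:
--                 for j in indices[rel[2]]:
--                     a_key[i * n + j] = v
--     return tuple(a_key)
-- ===== Notes on version B (the rewrite author's own statement) =====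
-- stated objective: alternative
-- what changed: Replaces the N*N pair scan with dict lookups by a name-to-indices table and direct indexed writes into the key array driven by the relationships themselves.
import Mathlib
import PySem

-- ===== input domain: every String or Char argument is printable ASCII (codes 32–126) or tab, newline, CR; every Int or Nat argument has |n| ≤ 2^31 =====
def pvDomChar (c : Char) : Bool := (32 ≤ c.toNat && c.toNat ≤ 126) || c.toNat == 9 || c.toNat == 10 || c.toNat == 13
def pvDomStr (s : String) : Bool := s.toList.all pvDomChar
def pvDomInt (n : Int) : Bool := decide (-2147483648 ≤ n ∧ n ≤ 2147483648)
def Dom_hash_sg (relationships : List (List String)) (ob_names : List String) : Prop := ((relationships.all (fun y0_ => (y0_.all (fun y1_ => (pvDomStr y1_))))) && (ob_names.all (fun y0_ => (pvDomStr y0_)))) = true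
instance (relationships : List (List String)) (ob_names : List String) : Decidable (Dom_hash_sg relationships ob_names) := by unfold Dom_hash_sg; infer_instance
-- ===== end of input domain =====

-- B replaces A's N*N pair-by-pair dict scan with a name→indices table and direct
-- indexed writes driven by the relationships (objective: alternative algorithm).

-- {"none": 0, "left": 1, "up": 2, "front": 3} (shared literal constant of A and B)
def pvPred2id : PySem.Dict String Int :=
  ((((PySem.Dict.empty).insert "none" 0).insert "left" 1).insert "up" 2).insert "front" 3

-- ===== PORT A =====
-- one relationship updates pair2pred (rel[0]/rel[1]/rel[2] via pyGetD; in range under Pre_)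
def pvStepA (d : PySem.Dict (String × String) Int) (rel : List String) :
    PySem.Dict (String × String) Int :=
  if PySem.List.pyGetD rel 1 "" ≠ "__in_image__" then
    d.insert (PySem.List.pyGetD rel 0 "", PySem.List.pyGetD rel 2 "")
             (pvPred2id.getD (PySem.List.pyGetD rel 1 "") 0)
  else d

def hash_sg (relationships : List (List String)) (ob_names : List String) : List Int :=
  -- a_key starts as all zeros; the idx scan writes pair2pred[(ob1,ob2)] where present,
  -- i.e. cell (ob1,ob2) is pair2pred.getD (ob1,ob2) 0
  let pair2pred := relationships.foldl pvStepA PySem.Dict.empty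
  ob_names.flatMap (fun ob1 => ob_names.map (fun ob2 => pair2pred.getD (ob1, ob2) 0))

-- ===== PORT B =====
-- name → list of all its indices in ob_names (Python: dict of lists built by enumerate)
def pvIndices (ob_names : List String) : PySem.Dict String (List Int) :=
  (PySem.List.enumerate ob_names).foldl
    (fun d p => d.insert p.2 (d.getD p.2 [] ++ [p.1])) PySem.Dict.empty

-- one relationship writes v into a_key[i*n+j] for all matching index pairs
def pvStepB (indices : PySem.Dict String (List Int)) (n : Nat)
    (arr : List Int) (rel : List String) : List Int :=
  if PySem.List.pyGetD rel 1 "" ≠ "__in_image__" then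
    (indices.getD (PySem.List.pyGetD rel 0 "") []).foldl (fun a i =>
      (indices.getD (PySem.List.pyGetD rel 2 "") []).foldl (fun a2 j =>
        PySem.List.pySetD a2 (i * (n : Int) + j)
          (pvPred2id.getD (PySem.List.pyGetD rel 1 "") 0)) a) arr
  else arr

def hash_sg_alt (relationships : List (List String)) (ob_names : List String) : List Int :=
  let n := ob_names.length
  let indices := pvIndices ob_names
  relationships.foldl (pvStepB indices n) (List.replicate (n * n) 0)

-- ===== PRECONDITION & SPEC =====
-- Pre_ excludes exactly the inputs where Python A raises: a relationship shorter than 3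
-- (IndexError in the assert), one whose endpoints are not in ob_names (AssertionError),
-- or a predicate that is neither "__in_image__" nor a key of pred2id (KeyError).
def Pre_hash_sg (relationships : List (List String)) (ob_names : List String) : Prop :=
  ∀ rel ∈ relationships, 3 ≤ rel.length ∧
    PySem.List.pyGetD rel 0 "" ∈ ob_names ∧ PySem.List.pyGetD rel 2 "" ∈ ob_names ∧
    (PySem.List.pyGetD rel 1 "" = "__in_image__" ∨
     PySem.List.pyGetD rel 1 "" ∈ (["none", "left", "up", "front"] : List String))

instance (relationships : List (List String)) (ob_names : List String) :
    Decidable (Pre_hash_sg relationships ob_names) := by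
  unfold Pre_hash_sg; infer_instance

def pvWitness_hash_sg : List (List String) × List String :=
  ([["a", "left", "b"], ["b", "__in_image__", "a"]], ["a", "b"])

def Spec_hash_sg (relationships : List (List String)) (ob_names : List String) (out : List Int) : Prop := out = hash_sg_alt relationships ob_names
instance (relationships : List (List String)) (ob_names : List String) (out : List Int) : Decidable (Spec_hash_sg relationships ob_names out) := by unfold Spec_hash_sg; infer_instance

-- ===== CLAIM (what is proved, stated in full; the proofs are below) =====
def Claim_equal_hash_sg : Prop := ∀ (relationships : List (List String)) (ob_names : List String), Dom_hash_sg relationships ob_names → Pre_hash_sg relationships ob_names → Spec_hash_sg relationships ob_names (hash_sg relationships ob_names)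

-- ===== LEMMAS AND PROOFS =====

-- characterisation of the index table: generalized fold invariant
theorem pvIndices_foldl (ps : List (Int × String)) (d : PySem.Dict String (List Int))
    (a : String) :
    (ps.foldl (fun d p => d.insert p.2 (d.getD p.2 [] ++ [p.1])) d).getD a [] =
      d.getD a [] ++ ps.filterMap (fun p => if p.2 = a then some p.1 else none) := by
  induction ps generalizing d with
  | nil => simp
  | cons q qs ih =>
    rw [List.foldl_cons, ih, PySem.Dict.getD_insert, List.filterMap_cons]
    by_cases h : q.2 = a
    · simp [h, eq_comm]
    · simp [h]; intro hh; exact absurd hh.symm h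

theorem mem_pvIndices (obs : List String) (a : String) (i : Int) :
    i ∈ (pvIndices obs).getD a [] ↔
      ∃ k : Nat, ∃ h : k < obs.length, obs[k] = a ∧ i = (k : Int) := by
  unfold pvIndices
  rw [pvIndices_foldl]
  simp only [PySem.Dict.getD_empty, List.nil_append, List.mem_filterMap,
    PySem.List.mem_enumerate_iff]
  constructor
  · rintro ⟨p, ⟨k, hk, rfl⟩, hf⟩
    simp only [Option.ite_none_right_eq_some, Option.some.injEq] at hf
    exact ⟨k, hk, hf.1, by omega⟩
  · rintro ⟨k, hk, ha, rfl⟩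
    exact ⟨((0 : Int) + (k : Int), obs[k]), ⟨k, hk, rfl⟩, by simp [ha]⟩

-- length is preserved by the nested write fold
theorem getD_set_int (l : List Int) (n p : Nat) (v : Int) :
    (l.set n v).getD p 0 = if p = n ∧ n < l.length then v else l.getD p 0 := by
  simp only [List.getD_eq_getElem?_getD, List.getElem?_set]
  split_ifs <;> simp_all

theorem length_foldl_pySetD (L : List Int) (f : Int → Int) (v : Int) (a : List Int) :
    (L.foldl (fun a2 j => PySem.List.pySetD a2 (f j) v) a).length = a.length := by
  induction L generalizing a with
  | nil => rfl
  | cons j L ih => rw [List.foldl_cons, ih, PySem.List.length_pySetD]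

theorem length_foldl_outer (L1 L2 : List Int) (n : Nat) (v : Int) (arr : List Int) :
    (L1.foldl (fun a i => L2.foldl (fun a2 j =>
        PySem.List.pySetD a2 (i * (n : Int) + j) v) a) arr).length = arr.length := by
  induction L1 generalizing arr with
  | nil => rfl
  | cons i L1 ih =>
    rw [List.foldl_cons, ih, length_foldl_pySetD L2 (fun j => i * (n : Int) + j)]

theorem length_pvStepB (indices : PySem.Dict String (List Int)) (n : Nat)
    (arr : List Int) (rel : List String) :
    (pvStepB indices n arr rel).length = arr.length := by
  unfold pvStepB
  split
  · exact length_foldl_outer _ _ _ _ _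
  · rfl

-- value at p after the inner write fold
theorem getD_foldl_pySetD (L : List Int) (f : Int → Int) (v : Int) (a : List Int) (p : Nat)
    (hL : ∀ j ∈ L, ∃ m : Nat, f j = (m : Int) ∧ m < a.length) (hp : p < a.length) :
    (L.foldl (fun a2 j => PySem.List.pySetD a2 (f j) v) a).getD p 0 =
      if ∃ j ∈ L, f j = (p : Int) then v else a.getD p 0 := by
  induction L generalizing a with
  | nil => simp
  | cons j L ih =>
    obtain ⟨m, hm, hmlt⟩ := hL j (List.mem_cons_self ..)
    rw [List.foldl_cons, hm, PySem.List.pySetD_natCast,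
      ih _ (fun j' hj' => by
        obtain ⟨m', hm', hmlt'⟩ := hL j' (List.mem_cons_of_mem _ hj')
        exact ⟨m', hm', by rwa [List.length_set]⟩) (by rwa [List.length_set])]
    by_cases hrest : ∃ j' ∈ L, f j' = (p : Int)
    · obtain ⟨j', hj', hfj⟩ := hrest
      rw [if_pos ⟨j', hj', hfj⟩, if_pos ⟨j', List.mem_cons_of_mem _ hj', hfj⟩]
    · rw [if_neg hrest, getD_set_int]
      by_cases hj : f j = (p : Int)
      · have : p = m := by rw [hm] at hj; exact_mod_cast hj.symm
        rw [if_pos ⟨this, this ▸ hmlt⟩, if_pos ⟨j, List.mem_cons_self .., hj⟩]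
      · have hpm : ¬ (p = m ∧ m < a.length) := by
          rintro ⟨rfl, -⟩; exact hj (by rw [hm])
        have hnone : ¬ ∃ j' ∈ j :: L, f j' = (p : Int) := by
          rintro ⟨j', hj', hfj⟩
          rcases List.mem_cons.1 hj' with rfl | hmem
          exacts [hj hfj, hrest ⟨j', hmem, hfj⟩]
        rw [if_neg hpm, if_neg hnone]

-- value at p after the nested write fold of one relationship
theorem getD_foldl_outer (L1 L2 : List Int) (n : Nat) (v : Int) (arr : List Int) (p : Nat)
    (h1 : ∀ i ∈ L1, ∃ k : Nat, i = (k : Int) ∧ k < n)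
    (h2 : ∀ j ∈ L2, ∃ m : Nat, j = (m : Int) ∧ m < n)
    (hlen : arr.length = n * n) (hp : p < n * n) :
    (L1.foldl (fun a i => L2.foldl (fun a2 j =>
        PySem.List.pySetD a2 (i * (n : Int) + j) v) a) arr).getD p 0 =
      if ∃ i ∈ L1, ∃ j ∈ L2, i * (n : Int) + j = (p : Int) then v else arr.getD p 0 := by
  induction L1 generalizing arr with
  | nil => simp
  | cons i L1 ih =>
    obtain ⟨k, rfl, hk⟩ := h1 i (List.mem_cons_self ..)
    have hlen' : (L2.foldl (fun a2 j =>
        PySem.List.pySetD a2 ((k : Int) * (n : Int) + j) v) arr).length = n * n := by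
      rw [length_foldl_pySetD L2 (fun j => (k : Int) * (n : Int) + j), hlen]
    rw [List.foldl_cons, ih _ (fun i hi => h1 i (List.mem_cons_of_mem _ hi)) hlen',
      getD_foldl_pySetD L2 (fun j => (k : Int) * (n : Int) + j) v arr p
        (fun j hj => by
          obtain ⟨m, rfl, hm⟩ := h2 j hj
          refine ⟨k * n + m, by push_cast; ring, ?_⟩
          rw [hlen]; nlinarith)
        (hlen ▸ hp)]
    by_cases hL1 : ∃ i ∈ L1, ∃ j ∈ L2, i * (n : Int) + j = (p : Int)
    · obtain ⟨i, hi, hj⟩ := hL1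
      rw [if_pos ⟨i, hi, hj⟩, if_pos ⟨i, List.mem_cons_of_mem _ hi, hj⟩]
    · rw [if_neg hL1]
      by_cases hk2 : ∃ j ∈ L2, (k : Int) * (n : Int) + j = (p : Int)
      · rw [if_pos hk2, if_pos ⟨(k : Int), List.mem_cons_self .., hk2⟩]
      · have hno : ¬ ∃ i ∈ (k : Int) :: L1, ∃ j ∈ L2, i * (n : Int) + j = (p : Int) := by
          rintro ⟨i, hi, hj⟩
          rcases List.mem_cons.1 hi with rfl | hmem
          exacts [hk2 hj, hL1 ⟨i, hmem, hj⟩]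
        rw [if_neg hk2, if_neg hno]

-- loop invariant: B's array always holds the current dict, cell by cell
theorem pv_inv (obs : List String) (rels : List (List String)) :
    ∀ (arr : List Int) (d : PySem.Dict (String × String) Int),
    arr.length = obs.length * obs.length →
    (∀ p : Nat, p < obs.length * obs.length →
      arr.getD p 0 = d.getD (obs.getD (p / obs.length) "", obs.getD (p % obs.length) "") 0) →
    (rels.foldl (pvStepB (pvIndices obs) obs.length) arr).length =
        obs.length * obs.length ∧
    ∀ p : Nat, p < obs.length * obs.length →
      (rels.foldl (pvStepB (pvIndices obs) obs.length) arr).getD p 0 =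
        (rels.foldl pvStepA d).getD
          (obs.getD (p / obs.length) "", obs.getD (p % obs.length) "") 0 := by
  induction rels with
  | nil =>
    intro arr d hlen hinv
    exact ⟨hlen, fun p hp => by rw [List.foldl_nil, List.foldl_nil]; exact hinv p hp⟩
  | cons rel rels ih =>
    intro arr d hlen hinv
    rw [List.foldl_cons, List.foldl_cons]
    refine ih (pvStepB (pvIndices obs) obs.length arr rel) (pvStepA d rel)
      (by rw [length_pvStepB]; exact hlen) ?_
    intro p hp
    have hnpos : 0 < obs.length := by
      rcases Nat.eq_zero_or_pos obs.length with h0 | h0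
      · rw [h0, Nat.mul_zero] at hp; omega
      · exact h0
    unfold pvStepB pvStepA
    split_ifs with hc
    · rw [getD_foldl_outer _ _ obs.length _ arr p
        (fun i hi => by
          obtain ⟨k, hk, hka, rfl⟩ := (mem_pvIndices obs _ i).1 hi
          exact ⟨k, rfl, hk⟩)
        (fun j hj => by
          obtain ⟨m, hm, hma, rfl⟩ := (mem_pvIndices obs _ j).1 hj
          exact ⟨m, rfl, hm⟩) hlen hp, PySem.Dict.getD_insert]
      have hiff : (∃ i ∈ (pvIndices obs).getD (PySem.List.pyGetD rel 0 "") [],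
            ∃ j ∈ (pvIndices obs).getD (PySem.List.pyGetD rel 2 "") [],
              i * (obs.length : Int) + j = (p : Int)) ↔
          (obs.getD (p / obs.length) "", obs.getD (p % obs.length) "") =
            (PySem.List.pyGetD rel 0 "", PySem.List.pyGetD rel 2 "") := by
        constructor
        · rintro ⟨i, hi, j, hj, heq⟩
          obtain ⟨k, hk, hka, rfl⟩ := (mem_pvIndices obs _ i).1 hi
          obtain ⟨m, hm, hma, rfl⟩ := (mem_pvIndices obs _ j).1 hj
          have hp' : k * obs.length + m = p := by exact_mod_cast heq
          have hdk : p / obs.length = k := by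
            rw [← hp', Nat.mul_comm k obs.length, Nat.mul_add_div hnpos,
              Nat.div_eq_of_lt hm, Nat.add_zero]
          have hdm : p % obs.length = m := by
            rw [← hp', Nat.add_comm, Nat.add_mul_mod_self_right, Nat.mod_eq_of_lt hm]
          rw [hdk, hdm, List.getD_eq_getElem _ _ hk, List.getD_eq_getElem _ _ hm, hka, hma]
        · intro heq
          have hk : p / obs.length < obs.length := (Nat.div_lt_iff_lt_mul hnpos).2 hp
          have hm : p % obs.length < obs.length := Nat.mod_lt _ hnpos
          rw [Prod.mk.injEq] at heq
          refine ⟨((p / obs.length : Nat) : Int), (mem_pvIndices obs _ _).2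
              ⟨p / obs.length, hk, ?_, rfl⟩,
            ((p % obs.length : Nat) : Int), (mem_pvIndices obs _ _).2
              ⟨p % obs.length, hm, ?_, rfl⟩, ?_⟩
          · rw [← List.getD_eq_getElem _ "" hk]; exact heq.1
          · rw [← List.getD_eq_getElem _ "" hm]; exact heq.2
          · have := Nat.div_add_mod p obs.length
            push_cast
            exact_mod_cast congrArg (Nat.cast : Nat → Int)
              (by rw [Nat.mul_comm]; exact this)
      by_cases hC : (obs.getD (p / obs.length) "", obs.getD (p % obs.length) "") =
          (PySem.List.pyGetD rel 0 "", PySem.List.pyGetD rel 2 "")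
      · rw [if_pos (hiff.2 hC), if_pos hC]
      · rw [if_neg (fun h => hC (hiff.1 h)), if_neg hC]
        exact hinv p hp
    · exact hinv p hp

theorem length_flatMap_map (out inner : List String) (g : String → String → Int) :
    (out.flatMap (fun o1 => inner.map (g o1))).length = out.length * inner.length := by
  induction out with
  | nil => simp
  | cons x xs ih => simp [ih, Nat.succ_mul, Nat.add_comm]

theorem getD_flatMap_map (out inner : List String) (g : String → String → Int) (p : Nat)
    (hp : p < out.length * inner.length) :
    (out.flatMap (fun o1 => inner.map (g o1))).getD p 0 =
      g (out.getD (p / inner.length) "") (inner.getD (p % inner.length) "") := by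
  induction out generalizing p with
  | nil => simp at hp
  | cons x xs ih =>
    have hM : 0 < inner.length := by
      rcases Nat.eq_zero_or_pos inner.length with h0 | h0
      · rw [h0, Nat.mul_zero] at hp; omega
      · exact h0
    rw [List.flatMap_cons]
    by_cases h : p < inner.length
    · rw [List.getD_append _ _ _ _ (by simpa using h), Nat.div_eq_of_lt h,
        Nat.mod_eq_of_lt h]
      simp [List.getD_eq_getElem?_getD, h]
    · have hq : p - inner.length < xs.length * inner.length := by
        have := List.length_cons (a := x) (as := xs) ▸ hp
        simp only [List.length_cons] at hp
        have : (xs.length + 1) * inner.length = xs.length * inner.length + inner.length :=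
          by ring
        omega
      rw [List.getD_append_right _ _ _ _ (by simpa using not_lt.1 h)]
      simp only [List.length_map]
      rw [ih _ hq]
      have hrw : p = (p - inner.length) + inner.length := by omega
      have hdiv : p / inner.length = (p - inner.length) / inner.length + 1 := by
        conv_lhs => rw [hrw]
        rw [Nat.add_div_right _ hM]
      have hmod : p % inner.length = (p - inner.length) % inner.length := by
        conv_lhs => rw [hrw]
        rw [Nat.add_mod_right]
      rw [hdiv, hmod, List.getD_cons_succ]

-- ===== VERDICT (by name: the statement is the Claim_ definition above) =====
theorem hash_sg_spec : Claim_equal_hash_sg := by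
  intro rels obs _ _
  show hash_sg rels obs = hash_sg_alt rels obs
  obtain ⟨hlenB, hvalB⟩ := pv_inv obs rels (List.replicate (obs.length * obs.length) 0)
    PySem.Dict.empty (by simp) (fun p hp => by simp [PySem.Dict.getD_empty])
  show obs.flatMap (fun ob1 => obs.map (fun ob2 =>
      (rels.foldl pvStepA PySem.Dict.empty).getD (ob1, ob2) 0)) =
    rels.foldl (pvStepB (pvIndices obs) obs.length)
      (List.replicate (obs.length * obs.length) 0)
  apply List.ext_getElem
  · rw [length_flatMap_map, hlenB]
  · intro i h1 h2
    have hi : i < obs.length * obs.length := by rwa [length_flatMap_map] at h1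
    rw [← List.getD_eq_getElem _ 0 h1, ← List.getD_eq_getElem _ 0 h2,
      getD_flatMap_map _ _ _ _ hi, hvalB i hi]
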